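-- pv_equiv track=rewrite | github.com/yoganandampamula/yoganandam-pamula--customer-churn-prediction-project-file | Untitled-1.py | solve
-- ===== SOURCE A (Python) =====
-- def solve(N, A):
--     def count_unique_subarray_sums(arr):
--         """
--         Counts the number of unique subarray sums in a given array.
--
--         Args:
--             arr: The input array.
--
--         Returns:
--             The number of unique subarray sums.
--         """
--         n = len(arr)
--         unique_sums = set()  # Use a set to store unique sums
--
--         # Iterate through all possible subarrays
--         for i in range(n):
--             current_sum = 0
--             for j in range(i, n):
--                 current_sum += arr[j]
--                 unique_sums.add(current_sum)
--
--         return len(unique_sums)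
--
--     return count_unique_subarray_sums(A)
-- ===== SOURCE B (Python) =====
-- def solve(N, A):
--     # Prefix-sum table: every subarray sum is P[b] - P[a] for 0 <= a < b <= n.
--     n = len(A)
--     P = [0]
--     for x in A:
--         P.append(P[-1] + x)
--     sums = set()
--     for a in range(n + 1):
--         for b in range(a + 1, n + 1):
--             sums.add(P[b] - P[a])
--     return len(sums)
-- ===== Notes on version B (the rewrite author's own statement) =====
-- stated objective: alternative
-- what changed: B builds an explicit prefix-sum table once and enumerates differences P[b]-P[a] over index pairs into a set, instead of A's per-start running-sum accumulation; no running state per subarray.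
import Mathlib
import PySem

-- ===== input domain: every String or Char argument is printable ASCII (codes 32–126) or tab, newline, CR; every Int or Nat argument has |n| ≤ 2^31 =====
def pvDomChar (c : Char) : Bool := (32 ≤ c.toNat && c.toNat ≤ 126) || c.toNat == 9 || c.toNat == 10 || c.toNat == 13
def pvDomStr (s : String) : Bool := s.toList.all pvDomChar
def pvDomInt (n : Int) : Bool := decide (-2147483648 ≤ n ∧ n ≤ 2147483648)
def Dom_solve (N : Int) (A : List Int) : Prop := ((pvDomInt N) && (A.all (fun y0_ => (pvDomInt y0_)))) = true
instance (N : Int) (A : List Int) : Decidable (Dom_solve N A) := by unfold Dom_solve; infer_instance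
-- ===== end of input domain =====

-- B replaces A's per-start running-sum accumulation by a prefix-sum table and a loop over
-- index pairs (a, b), collecting P[b] - P[a] in a set; same O(n^2) cost, different decomposition.

-- ===== PORT A =====
def solve (N : Int) (A : List Int) : Int :=
  let n : Int := A.length
  let uniqueSums : PySem.Set Int :=
    (PySem.List.pyRange 0 n 1).foldl (fun us i =>
      ((PySem.List.pyRange i n 1).foldl
        (fun (st : Int × PySem.Set Int) j =>
          let cs := st.1 + PySem.List.pyGetD A j 0
          (cs, PySem.Set.add st.2 cs))
        ((0 : Int), us)).2)
      PySem.Set.empty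
  PySem.Set.len uniqueSums

-- ===== PORT B =====
def solve_alt (N : Int) (A : List Int) : Int :=
  let n : Int := A.length
  let P : List Int := A.foldl (fun P x => P ++ [PySem.List.pyGetD P (-1) 0 + x]) [(0 : Int)]
  let sums : PySem.Set Int :=
    (PySem.List.pyRange 0 (n + 1) 1).foldl (fun s a =>
      (PySem.List.pyRange (a + 1) (n + 1) 1).foldl
        (fun s b => PySem.Set.add s (PySem.List.pyGetD P b 0 - PySem.List.pyGetD P a 0)) s)
      PySem.Set.empty
  PySem.Set.len sums

-- ===== PRECONDITION & SPEC =====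
def Spec_solve (N : Int) (A : List Int) (out : Int) : Prop := out = solve_alt N A
instance (N : Int) (A : List Int) (out : Int) : Decidable (Spec_solve N A out) := by unfold Spec_solve; infer_instance

-- ===== CLAIM (what is proved, stated in full; the proofs are below) =====
def Claim_equal_solve : Prop := ∀ (N : Int) (A : List Int), Dom_solve N A → Spec_solve N A (solve N A)

-- ===== LEMMAS AND PROOFS =====

-- running sums of xs starting from c (proof-side helper)
def preSums : Int → List Int → List Int
  | _, [] => []
  | c, x :: xs => (c + x) :: preSums (c + x) xs

theorem length_preSums (xs : List Int) : ∀ c, (preSums c xs).length = xs.length := by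
  induction xs with
  | nil => intro c; rfl
  | cons a xs ih => intro c; simp [preSums, ih]

theorem getElem_preSums (xs : List Int) : ∀ (c : Int) (k : Nat) (hk : k < xs.length),
    (preSums c xs)[k]'(by rw [length_preSums]; exact hk) = c + ((xs.take (k + 1)).sum) := by
  induction xs with
  | nil => intro c k hk; simp at hk
  | cons a xs ih =>
    intro c k hk
    cases k with
    | zero => simp [preSums]
    | succ k =>
      simp only [preSums, List.getElem_cons_succ, List.take_succ_cons, List.sum_cons]
      rw [ih (c + a) k (by simpa using hk)]
      ring

theorem mem_preSums (xs : List Int) (c x : Int) :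
    x ∈ preSums c xs ↔ ∃ k : Nat, k < xs.length ∧ x = c + ((xs.take (k + 1)).sum) := by
  rw [List.mem_iff_getElem]
  constructor
  · rintro ⟨k, hk, hx⟩
    rw [length_preSums] at hk
    exact ⟨k, hk, by rw [← getElem_preSums xs c k hk]; exact hx.symm⟩
  · rintro ⟨k, hk, hx⟩
    exact ⟨k, by rw [length_preSums]; exact hk, by rw [getElem_preSums xs c k hk]; exact hx.symm⟩

-- B's prefix-table construction
theorem build_P (A : List Int) : ∀ (P0 : List Int) (h : P0 ≠ []),
    A.foldl (fun P x => P ++ [PySem.List.pyGetD P (-1) 0 + x]) P0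
      = P0 ++ preSums (P0.getLast h) A := by
  induction A with
  | nil => intro P0 h; simp [preSums]
  | cons a A ih =>
    intro P0 h
    simp only [List.foldl_cons]
    rw [PySem.List.pyGetD_neg_one P0 0 h]
    rw [ih (P0 ++ [P0.getLast h + a]) (by simp)]
    rw [List.getLast_concat]
    simp [preSums]

-- membership of a fold of Set.add over values g y
theorem mem_foldl_add {β : Type} (l : List β) (g : β → Int) :
    ∀ (s : PySem.Set Int) (x : Int),
      x ∈ l.foldl (fun s y => PySem.Set.add s (g y)) s ↔ x ∈ s ∨ ∃ y ∈ l, x = g y := by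
  induction l with
  | nil => intro s x; simp
  | cons a l ih =>
    intro s x
    simp only [List.foldl_cons, ih, PySem.Set.mem_add, List.mem_cons]
    constructor
    · rintro (⟨h | h⟩ | ⟨y, hy, hx⟩)
      · exact Or.inl h
      · exact Or.inr ⟨a, Or.inl rfl, h⟩
      · exact Or.inr ⟨y, Or.inr hy, hx⟩
    · rintro (h | ⟨y, hy | hy, hx⟩)
      · exact Or.inl (Or.inl h)
      · exact Or.inl (Or.inr (hy ▸ hx))
      · exact Or.inr ⟨y, hy, hx⟩

theorem nodup_foldl_add {β : Type} (l : List β) (g : β → Int) :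
    ∀ (s : PySem.Set Int), s.Nodup → (l.foldl (fun s y => PySem.Set.add s (g y)) s).Nodup := by
  induction l with
  | nil => intro s hs; exact hs
  | cons a l ih => intro s hs; exact ih _ (PySem.Set.nodup_add s (g a) hs)

-- A's inner loop carries (current_sum, set); it equals a plain Set.add fold over running sums
theorem pairfold (f : Int → Int) (L : List Int) : ∀ (c : Int) (s : PySem.Set Int),
    L.foldl (fun (st : Int × PySem.Set Int) j =>
        ((st.1 + f j), PySem.Set.add st.2 (st.1 + f j))) (c, s)
      = (c + (L.map f).sum,
         (preSums c (L.map f)).foldl (fun s y => PySem.Set.add s y) s) := by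
  induction L with
  | nil => intro c s; simp [preSums]
  | cons a L ih =>
    intro c s
    simp only [List.foldl_cons, List.map_cons, List.sum_cons, preSums, ih]
    rw [add_assoc]

-- plain-value specializations
theorem mem_foldl_addv (l : List Int) :
    ∀ (s : PySem.Set Int) (x : Int),
      x ∈ l.foldl (fun s y => PySem.Set.add s y) s ↔ x ∈ s ∨ x ∈ l := by
  induction l with
  | nil => intro s x; simp
  | cons a l ih =>
    intro s x
    simp only [List.foldl_cons, ih, PySem.Set.mem_add, List.mem_cons]
    tauto

theorem nodup_foldl_addv (l : List Int) :
    ∀ (s : PySem.Set Int), s.Nodup → (l.foldl (fun s y => PySem.Set.add s y) s).Nodup := by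
  induction l with
  | nil => intro s hs; exact hs
  | cons a l ih => intro s hs; exact ih _ (PySem.Set.nodup_add s a hs)

-- membership of A's outer fold, with steps rewritten to Set.add folds over lists L i
theorem mem_foldl_union (L : Int → List Int) (l : List Int) :
    ∀ (s : PySem.Set Int) (x : Int),
      x ∈ l.foldl (fun s i => (L i).foldl (fun s y => PySem.Set.add s y) s) s
        ↔ x ∈ s ∨ ∃ i ∈ l, x ∈ L i := by
  induction l with
  | nil => intro s x; simp
  | cons a l ih =>
    intro s x
    simp only [List.foldl_cons, ih, List.mem_cons, mem_foldl_addv (L a) s x]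
    constructor
    · rintro (⟨h | h⟩ | ⟨i, hi, hx⟩)
      · exact Or.inl h
      · exact Or.inr ⟨a, Or.inl rfl, h⟩
      · exact Or.inr ⟨i, Or.inr hi, hx⟩
    · rintro (h | ⟨i, hi | hi, hx⟩)
      · exact Or.inl (Or.inl h)
      · exact Or.inl (Or.inr (hi ▸ hx))
      · exact Or.inr ⟨i, hi, hx⟩

theorem nodup_foldl_union (L : Int → List Int) (l : List Int) :
    ∀ (s : PySem.Set Int), s.Nodup →
      (l.foldl (fun s i => (L i).foldl (fun s y => PySem.Set.add s y) s) s).Nodup := by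
  induction l with
  | nil => intro s hs; exact hs
  | cons a l ih => intro s hs; exact ih _ (nodup_foldl_addv (L a) s hs)

-- membership of B's nested pair fold
theorem mem_foldl_add2 (r : Int → List Int) (g : Int → Int → Int) (l : List Int) :
    ∀ (s : PySem.Set Int) (x : Int),
      x ∈ l.foldl (fun s a => (r a).foldl (fun s b => PySem.Set.add s (g a b)) s) s
        ↔ x ∈ s ∨ ∃ a ∈ l, ∃ b ∈ r a, x = g a b := by
  induction l with
  | nil => intro s x; simp
  | cons a l ih =>
    intro s x
    simp only [List.foldl_cons, ih, List.mem_cons]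
    rw [mem_foldl_add (r a) (g a) s x]
    constructor
    · rintro (⟨h | h⟩ | ⟨i, hi, hx⟩)
      · exact Or.inl h
      · obtain ⟨b, hb, rfl⟩ := h; exact Or.inr ⟨a, Or.inl rfl, b, hb, rfl⟩
      · exact Or.inr ⟨i, Or.inr hi, hx⟩
    · rintro (h | ⟨i, hi | hi, hx⟩)
      · exact Or.inl (Or.inl h)
      · exact Or.inl (Or.inr (by subst hi; exact hx))
      · exact Or.inr ⟨i, hi, hx⟩

theorem nodup_foldl_add2 (r : Int → List Int) (g : Int → Int → Int) (l : List Int) :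
    ∀ (s : PySem.Set Int), s.Nodup →
      (l.foldl (fun s a => (r a).foldl (fun s b => PySem.Set.add s (g a b)) s) s).Nodup := by
  induction l with
  | nil => intro s hs; exact hs
  | cons a l ih => intro s hs; exact ih _ (nodup_foldl_add (r a) (g a) s hs)

-- subarray sum as a difference of prefix sums
theorem dropTake_sum (A : List Int) (i j : Nat) (hij : i ≤ j) :
    (((A.drop i).take (j - i + 1)).sum) = ((A.take (j + 1)).sum) - ((A.take i).sum) := by
  have h : i + (j - i + 1) = j + 1 := by omega
  have := List.take_add (l := A) (i := i) (j := j - i + 1)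
  rw [h] at this
  rw [this, List.sum_append]
  ring

-- value of B's prefix table at an in-range index
theorem P_get (A : List Int) (c : Int) (h0 : 0 ≤ c) (h1 : c ≤ (A.length : Int)) :
    PySem.List.pyGetD (0 :: preSums 0 A) c 0 = ((A.take c.toNat).sum) := by
  rw [PySem.List.pyGetD_eq_getElem _ 0 h0 (by simp [length_preSums]; omega)]
  rw [List.getElem_cons]
  split_ifs with hz
  · rw [hz]; simp
  · have hk : c.toNat - 1 < A.length := by omega
    rw [getElem_preSums A 0 (c.toNat - 1) hk]
    have : c.toNat - 1 + 1 = c.toNat := by omega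
    rw [this]
    omega

-- membership in A's set, in canonical prefix-difference form
theorem memA (A : List Int) (x : Int) :
    x ∈ (PySem.List.pyRange 0 (A.length : Int)).foldl
        (fun us i => (preSums 0 (A.drop i.toNat)).foldl (fun s y => PySem.Set.add s y) us)
        PySem.Set.empty
      ↔ ∃ a b : Nat, a < b ∧ b ≤ A.length ∧ x = ((A.take b).sum) - ((A.take a).sum) := by
  rw [mem_foldl_union (fun i => preSums 0 (A.drop i.toNat)) _ PySem.Set.empty x]
  constructor
  · rintro (h | ⟨i, hi, hx⟩)
    · simp [PySem.Set.empty] at h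
    · rw [PySem.List.mem_pyRange_one] at hi
      rw [mem_preSums] at hx
      obtain ⟨k, hk, rfl⟩ := hx
      rw [List.length_drop] at hk
      refine ⟨i.toNat, i.toNat + k + 1, by omega, by omega, ?_⟩
      have h1 : k + 1 = (i.toNat + k) - i.toNat + 1 := by omega
      rw [h1, dropTake_sum A i.toNat (i.toNat + k) (by omega)]
      ring
  · rintro ⟨a, b, hab, hbn, rfl⟩
    refine Or.inr ⟨(a : Int), ?_, ?_⟩
    · rw [PySem.List.mem_pyRange_one]; constructor <;> [positivity; exact_mod_cast by omega]
    · rw [mem_preSums]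
      refine ⟨b - a - 1, by simp [List.length_drop]; omega, ?_⟩
      have h1 : b - a - 1 + 1 = (b - 1) - (a : Int).toNat + 1 := by omega
      rw [h1, dropTake_sum A (a : Int).toNat (b - 1) (by omega)]
      have h2 : b - 1 + 1 = b := by omega
      rw [h2]
      simp

-- membership in B's set, in the same canonical form
theorem memB (A : List Int) (x : Int) :
    x ∈ (PySem.List.pyRange 0 ((A.length : Int) + 1)).foldl
        (fun s a => (PySem.List.pyRange (a + 1) ((A.length : Int) + 1)).foldl
          (fun s b => PySem.Set.add s
            (PySem.List.pyGetD (0 :: preSums 0 A) b 0 - PySem.List.pyGetD (0 :: preSums 0 A) a 0)) s)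
        PySem.Set.empty
      ↔ ∃ a b : Nat, a < b ∧ b ≤ A.length ∧ x = ((A.take b).sum) - ((A.take a).sum) := by
  rw [mem_foldl_add2 (fun a => PySem.List.pyRange (a + 1) ((A.length : Int) + 1))
      (fun a b => PySem.List.pyGetD (0 :: preSums 0 A) b 0 - PySem.List.pyGetD (0 :: preSums 0 A) a 0)
      _ PySem.Set.empty x]
  constructor
  · rintro (h | ⟨a, ha, b, hb, rfl⟩)
    · simp [PySem.Set.empty] at h
    · rw [PySem.List.mem_pyRange_one] at ha hb
      rw [P_get A a ha.1 (by omega), P_get A b (by omega) (by omega)]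
      exact ⟨a.toNat, b.toNat, by omega, by omega, by rfl⟩
  · rintro ⟨a, b, hab, hbn, rfl⟩
    refine Or.inr ⟨(a : Int), ?_, (b : Int), ?_, ?_⟩
    · rw [PySem.List.mem_pyRange_one]; omega
    · rw [PySem.List.mem_pyRange_one]; omega
    · rw [P_get A a (by positivity) (by exact_mod_cast by omega),
          P_get A b (by positivity) (by exact_mod_cast by omega)]
      simp

-- ===== VERDICT (by name: the statement is the Claim_ definition above) =====
theorem solve_spec : Claim_equal_solve := by
  intro N A _
  unfold Spec_solve solve solve_alt
  simp only []
  rw [build_P A [0] (by simp)]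
  simp only [List.getLast_singleton, List.singleton_append]
  rw [PySem.List.foldl_congr_mem _ _
      (fun us i => (preSums 0 (A.drop i.toNat)).foldl (fun s y => PySem.Set.add s y) us) _
      (by
        intro us i hi
        rw [PySem.List.mem_pyRange_one] at hi
        rw [pairfold (fun j => PySem.List.pyGetD A j 0) (PySem.List.pyRange i (A.length : Int)) 0 us]
        simp only []
        rw [PySem.List.map_pyGetD_pyRange' A 0 hi.1])]
  have ndA := nodup_foldl_union (fun i => preSums 0 (A.drop i.toNat))
      (PySem.List.pyRange 0 (A.length : Int)) PySem.Set.empty List.nodup_nil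
  have ndB := nodup_foldl_add2 (fun a => PySem.List.pyRange (a + 1) ((A.length : Int) + 1))
      (fun a b => PySem.List.pyGetD (0 :: preSums 0 A) b 0 - PySem.List.pyGetD (0 :: preSums 0 A) a 0)
      (PySem.List.pyRange 0 ((A.length : Int) + 1)) PySem.Set.empty List.nodup_nil
  unfold PySem.Set.len
  congr 1
  rw [← List.toFinset_card_of_nodup ndA, ← List.toFinset_card_of_nodup ndB]
  congr 1
  ext x
  simp only [List.mem_toFinset]
  rw [memA A x, memB A x]
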